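-- pv_equiv track=rewrite | github.com/PaderinaViola/prg-basics | 04-Functions/7-25.py | f
-- ===== SOURCE A (Python) =====
-- def f(x,y):
--     count = 0
--     for digit in range(x, y+1):
--         digit_good = digit % 2
--         digit_good_too = digit % 3
--         digit_bad = digit % 4
--         if digit_good == 0 and digit_good_too == 0 and digit_bad != 0:
--             count += digit
--     return count
-- ===== SOURCE B (Python) =====
-- def f(x, y):
--     # closed form: sum of multiples of 6 in [x, y] that are not multiples of 4,
--     # i.e. 6*k for odd k with ceil(x/6) <= k <= floor(y/6)
--     a = -((-x) // 6)          # smallest k with 6*k >= x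
--     b = y // 6                # largest k with 6*k <= y
--     if a % 2 == 0:
--         a += 1                # clamp to odd endpoints
--     if b % 2 == 0:
--         b -= 1
--     if a > b:
--         return 0
--     m = (b - a) // 2 + 1      # how many odd k in [a, b]
--     return 3 * m * (a + b)    # 6 * (arithmetic-series sum of the k's)
-- ===== Notes on version B (the rewrite author's own statement) =====
-- stated objective: faster
-- what changed: Replaced the element-by-element scan of range(x, y+1) with a closed-form arithmetic-series formula over the odd quotients k of the multiples 6*k in [x, y] (divisible by 6 and not by 4 iff 6*k with k odd).
import Mathlib
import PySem

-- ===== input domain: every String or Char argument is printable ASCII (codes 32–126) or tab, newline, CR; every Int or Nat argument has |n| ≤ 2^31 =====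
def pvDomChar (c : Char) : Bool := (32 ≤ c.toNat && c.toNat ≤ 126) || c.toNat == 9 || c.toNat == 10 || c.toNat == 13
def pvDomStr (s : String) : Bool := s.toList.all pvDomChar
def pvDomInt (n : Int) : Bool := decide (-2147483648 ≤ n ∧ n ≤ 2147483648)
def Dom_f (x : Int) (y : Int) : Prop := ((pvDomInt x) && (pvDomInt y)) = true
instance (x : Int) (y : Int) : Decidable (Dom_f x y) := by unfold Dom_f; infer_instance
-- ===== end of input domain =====

-- B replaces A's linear scan of [x, y] with an O(1) closed-form arithmetic series over
-- the quotients k of the multiples 6*k that qualify (divisible by 6 and not by 4 ⇔ k odd).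

-- ===== PORT A =====
def f (x : Int) (y : Int) : Int :=
  (PySem.List.pyRange x (y + 1)).foldl
    (fun count digit =>
      let digit_good := PySem.Int.mod digit 2
      let digit_good_too := PySem.Int.mod digit 3
      let digit_bad := PySem.Int.mod digit 4
      if digit_good = 0 ∧ digit_good_too = 0 ∧ digit_bad ≠ 0 then count + digit else count)
    0

-- ===== PORT B =====
def f_alt (x : Int) (y : Int) : Int :=
  let a0 := -(PySem.Int.floordiv (-x) 6)
  let b0 := PySem.Int.floordiv y 6
  let a := if PySem.Int.mod a0 2 = 0 then a0 + 1 else a0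
  let b := if PySem.Int.mod b0 2 = 0 then b0 - 1 else b0
  if a > b then 0
  else 3 * (PySem.Int.floordiv (b - a) 2 + 1) * (a + b)

-- ===== PRECONDITION & SPEC =====
def Spec_f (x : Int) (y : Int) (out : Int) : Prop := out = f_alt x y
instance (x : Int) (y : Int) (out : Int) : Decidable (Spec_f x y out) := by unfold Spec_f; infer_instance

-- ===== CLAIM (what is proved, stated in full; the proofs are below) =====
def Claim_equal_f : Prop := ∀ (x : Int) (y : Int), Dom_f x y → Spec_f x y (f x y)

-- ===== LEMMAS AND PROOFS =====

-- proof-side names for the two ports' pieces (definitionally equal to what the ports compute)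
def pvStep (count : Int) (digit : Int) : Int :=
  if PySem.Int.mod digit 2 = 0 ∧ PySem.Int.mod digit 3 = 0 ∧ PySem.Int.mod digit 4 ≠ 0 then
    count + digit
  else count

def pvOddUp (a0 : Int) : Int := if PySem.Int.mod a0 2 = 0 then a0 + 1 else a0
def pvOddDown (b0 : Int) : Int := if PySem.Int.mod b0 2 = 0 then b0 - 1 else b0
def pvT (a : Int) (b : Int) : Int :=
  if a > b then 0 else 3 * (PySem.Int.floordiv (b - a) 2 + 1) * (a + b)

theorem f_eq (x y : Int) : f x y = (PySem.List.pyRange x (y + 1)).foldl pvStep 0 := rfl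

theorem f_alt_eq (x y : Int) :
    f_alt x y = pvT (pvOddUp (-(PySem.Int.floordiv (-x) 6))) (pvOddDown (PySem.Int.floordiv y 6)) := rfl

theorem pvOddUp_ge (a : Int) : a ≤ pvOddUp a ∧ pvOddUp a ≤ a + 1 ∧ pvOddUp a % 2 = 1 := by
  unfold pvOddUp
  rw [PySem.Int.mod_eq_emod_of_pos (by norm_num : (0:Int) < 2)]
  split_ifs <;> omega

theorem pvOddDown_le (b : Int) : b - 1 ≤ pvOddDown b ∧ pvOddDown b ≤ b ∧ pvOddDown b % 2 = 1 := by
  unfold pvOddDown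
  rw [PySem.Int.mod_eq_emod_of_pos (by norm_num : (0:Int) < 2)]
  split_ifs <;> omega

theorem pvOddUp_le_odd (a k : Int) (ha : a ≤ k) (hk : k % 2 = 1) : pvOddUp a ≤ k := by
  unfold pvOddUp
  rw [PySem.Int.mod_eq_emod_of_pos (by norm_num : (0:Int) < 2)]
  split_ifs <;> omega

theorem pvOddDown_even (b : Int) (h : b % 2 = 0) : pvOddDown b = b - 1 := by
  unfold pvOddDown
  rw [PySem.Int.mod_eq_emod_of_pos (by norm_num : (0:Int) < 2)]
  exact if_pos h

theorem pvOddDown_odd (b : Int) (h : b % 2 = 1) : pvOddDown b = b := by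
  unfold pvOddDown
  rw [PySem.Int.mod_eq_emod_of_pos (by norm_num : (0:Int) < 2)]
  exact if_neg (by omega)

-- the arithmetic-series step: dropping the top odd quotient k removes exactly 6*k
theorem pvT_step (a k : Int) (ha2 : a % 2 = 1) (hk2 : k % 2 = 1) (hak : a ≤ k) :
    pvT a k = pvT a (k - 2) + 6 * k := by
  unfold pvT
  rw [PySem.Int.floordiv_eq_ediv_of_pos (by norm_num : (0:Int) < 2),
      PySem.Int.floordiv_eq_ediv_of_pos (by norm_num : (0:Int) < 2)]
  by_cases heq : a = k
  · subst heq
    rw [if_neg (by omega), if_pos (by omega)]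
    have h0 : (a - a : Int) / 2 = 0 := by omega
    rw [h0]
    ring
  · have hle : a ≤ k - 2 := by omega
    rw [if_neg (by omega), if_neg (by omega)]
    obtain ⟨t, ht⟩ : ∃ t : Int, k = a + 2 * t := ⟨(k - a) / 2, by omega⟩
    subst ht
    have e1 : (a + 2 * t - a) / 2 = t := by omega
    have e2 : (a + 2 * t - 2 - a) / 2 = t - 1 := by omega
    rw [e1, e2]
    ring

theorem f_base (x y : Int) (h : y < x) : f x y = 0 := by
  rw [f_eq, PySem.List.pyRange_one_eq_nil (by omega)]
  rfl

theorem f_alt_base (x y : Int) (h : y < x) : f_alt x y = 0 := by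
  rw [f_alt_eq]
  have h6 : (0:Int) < 6 := by norm_num
  rw [PySem.Int.floordiv_eq_ediv_of_pos h6, PySem.Int.floordiv_eq_ediv_of_pos h6]
  have h1 := pvOddUp_ge (-(-x / 6))
  have h2 := pvOddDown_le (y / 6)
  have h3 : y / 6 < -(-x / 6) := by omega
  unfold pvT
  rw [if_pos (by omega)]

-- peeling the last element of A's loop
theorem f_step (x y : Int) (h : x ≤ y) :
    f x y = f x (y - 1) + (if 6 ∣ y ∧ ¬ (4 ∣ y) then y else 0) := by
  rw [f_eq, f_eq, PySem.List.pyRange_one_succ_right h]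
  have hy : y - 1 + 1 = y := by omega
  rw [hy, List.foldl_append]
  simp only [List.foldl_cons, List.foldl_nil]
  unfold pvStep
  rw [PySem.Int.mod_eq_emod_of_pos (by norm_num : (0:Int) < 2),
      PySem.Int.mod_eq_emod_of_pos (by norm_num : (0:Int) < 3),
      PySem.Int.mod_eq_emod_of_pos (by norm_num : (0:Int) < 4)]
  by_cases hc : 6 ∣ y ∧ ¬ (4 ∣ y)
  · rw [if_pos hc, if_pos (by omega)]
  · rw [if_neg hc, if_neg (by omega), add_zero]

-- the same step for B's closed form
theorem f_alt_step (x y : Int) (h : x ≤ y) :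
    f_alt x y = f_alt x (y - 1) + (if 6 ∣ y ∧ ¬ (4 ∣ y) then y else 0) := by
  rw [f_alt_eq, f_alt_eq]
  have h6 : (0:Int) < 6 := by norm_num
  rw [PySem.Int.floordiv_eq_ediv_of_pos h6, PySem.Int.floordiv_eq_ediv_of_pos h6,
      PySem.Int.floordiv_eq_ediv_of_pos h6]
  by_cases h6y : 6 ∣ y
  · obtain ⟨k, hk⟩ := h6y
    have hB : y / 6 = k := by omega
    have hB' : (y - 1) / 6 = k - 1 := by omega
    rw [hB, hB']
    by_cases hke : k % 2 = 0
    · -- k even ⇒ y divisible by 12, hence by 4: contribution 0, same clamped bound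
      rw [if_neg (by omega), pvOddDown_even _ hke, pvOddDown_odd _ (by omega), add_zero]
    · -- k odd ⇒ y ≡ 2 (mod 4): the top quotient k is new, adds 6*k = y
      rw [if_pos (by constructor <;> omega), pvOddDown_odd _ (by omega),
          pvOddDown_even _ (by omega)]
      have e : k - 1 - 1 = k - 2 := by omega
      rw [e]
      have hA : -(-x / 6) ≤ k := by omega
      have hu := pvOddUp_ge (-(-x / 6))
      rw [pvT_step (pvOddUp (-(-x / 6))) k (by omega) (by omega)
            (pvOddUp_le_odd _ _ hA (by omega))]
      omega
  · have hBB : y / 6 = (y - 1) / 6 := by omega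
    rw [hBB, if_neg (fun hc => h6y hc.1), add_zero]

-- ===== VERDICT (by name: the statement is the Claim_ definition above) =====
theorem f_spec : Claim_equal_f := by
  intro x y _
  unfold Spec_f
  have H : ∀ n : Nat, ∀ y : Int, (y + 1 - x).toNat = n → f x y = f_alt x y := by
    intro n
    induction n with
    | zero =>
      intro y hy
      have hlt : y < x := by omega
      rw [f_base _ _ hlt, f_alt_base _ _ hlt]
    | succ n ih =>
      intro y hy
      have hx : x ≤ y := by omega
      rw [f_step _ _ hx, f_alt_step _ _ hx, ih (y - 1) (by omega)]
  exact H _ y rfl
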